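-- pv_equiv track=rewrite | github.com/LZpenguin/trans | data/x/process_srt.py | process_srt_content
-- ===== SOURCE A (Python) =====
-- def process_srt_content(content):
--     """
--     处理SRT文件内容
--     """
--     lines = content.split('\n')
--     processed_lines = []
--
--     i = 0
--     while i < len(lines):
--         line = lines[i].strip()
--
--         # 如果是序号行（纯数字）
--         if line.isdigit():
--             processed_lines.append(line)
--             i += 1
--             continue
--
--         # 如果是时间戳行
--         if '-->' in line:
--             processed_lines.append(line)
--             i += 1
--             continue
--
--         # 如果是空行
--         if not line:
--             processed_lines.append('')
--             i += 1
--             continue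
--
--         # 处理字幕文本行
--         # 收集连续的非空行作为一个字幕块
--         subtitle_lines = []
--         while i < len(lines) and lines[i].strip() and not lines[i].strip().isdigit() and '-->' not in lines[i]:
--             subtitle_lines.append(lines[i].strip())
--             i += 1
--
--         # 将多行字幕合并为一行，用空格连接
--         if subtitle_lines:
--             combined_subtitle = ' '.join(subtitle_lines)
--             # 删除所有的[和]
--             combined_subtitle = combined_subtitle.replace('[', '').replace(']', '')
--             processed_lines.append(combined_subtitle)
--
--     return '\n'.join(processed_lines)
-- ===== SOURCE B (Python) =====
-- def process_srt_content(content):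
--     """
--     处理SRT文件内容
--     """
--     processed_lines = []
--     buffer = []
--
--     def flush():
--         if buffer:
--             processed_lines.append(' '.join(buffer).replace('[', '').replace(']', ''))
--             buffer.clear()
--
--     for raw in content.split('\n'):
--         s = raw.strip()
--         if s and not s.isdigit() and '-->' not in s:
--             buffer.append(s)
--         else:
--             flush()
--             processed_lines.append(s)
--     flush()
--     return '\n'.join(processed_lines)
-- ===== Notes on version B (the rewrite author's own statement) =====
-- stated objective: simpler
-- what changed: A's index-driven while loop with an inner look-ahead while that collects a subtitle block is replaced by a single for-loop over the lines with a buffer accumulator that is flushed before each special line and once after the loop.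
import Mathlib
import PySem

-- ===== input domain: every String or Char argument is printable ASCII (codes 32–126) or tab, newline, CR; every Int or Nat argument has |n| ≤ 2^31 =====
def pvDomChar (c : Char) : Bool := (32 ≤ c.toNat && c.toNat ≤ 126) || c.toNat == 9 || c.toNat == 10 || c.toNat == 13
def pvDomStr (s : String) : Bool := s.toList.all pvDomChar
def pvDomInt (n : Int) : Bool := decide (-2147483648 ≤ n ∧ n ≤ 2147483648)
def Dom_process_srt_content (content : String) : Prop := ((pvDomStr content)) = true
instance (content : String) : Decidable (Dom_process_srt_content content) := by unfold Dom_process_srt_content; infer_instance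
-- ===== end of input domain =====

-- B replaces A's index-and-inner-look-ahead while loop by a single pass with a `buffer`
-- accumulator that is flushed before each special line and once at the end (objective: simpler).

-- ===== PORT A =====

-- Condition of A's inner `while` (note: the '-->' test is on the UNSTRIPPED line there):
-- lines[i].strip() and not lines[i].strip().isdigit() and '-->' not in lines[i]
def pvPredA (l : String) : Bool :=
  PySem.Str.len (PySem.Str.strip l) != 0
    && !PySem.Str.strIsdigit (PySem.Str.strip l)
    && !PySem.Str.isIn "-->" l

-- '-->' consists of non-whitespace characters, so it occurs in a line iff it occurs in
-- the stripped line; pvLoopA's termination (A's inner while always consumes the current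
-- line in the subtitle branch) needs this, so it sits above the port, which cites it.
theorem pv_infix_dropWhile {t cs : List Char}
    (hne : t ≠ []) (hns : ∀ c ∈ t, PySem.Chars.isspace c = false) (h : t <:+: cs) :
    t <:+: cs.dropWhile PySem.Chars.isspace := by
  induction cs with
  | nil => simpa using h
  | cons c cs ih =>
    by_cases hc : PySem.Chars.isspace c = true
    · rw [List.dropWhile_cons_of_pos hc]
      rcases List.infix_cons_iff.mp h with hp | hi
      · obtain ⟨u, hu⟩ := hp
        cases t with
        | nil => exact absurd rfl hne
        | cons a t' =>
          injection hu with h1 _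
          have h2 := hns a (by simp)
          rw [h1, hc] at h2
          exact absurd h2 (by simp)
      · exact ih hi
    · rw [List.dropWhile_cons_of_neg hc]
      exact h

theorem pv_strip_infix (cs : List Char) : PySem.Chars.strip cs <:+: cs := by
  have h1 : PySem.Chars.lstrip cs <:+ cs := List.dropWhile_suffix _
  have h2 : PySem.Chars.rstrip (PySem.Chars.lstrip cs) <+: PySem.Chars.lstrip cs := by
    rw [PySem.Chars.rstrip, ← List.reverse_suffix, List.reverse_reverse]
    exact List.dropWhile_suffix _
  rw [PySem.Chars.strip]
  exact h2.isInfix.trans h1.isInfix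

theorem pv_arrow_ne_nil : "-->".toList ≠ [] := by
  rw [show "-->".toList = ['-','-','>'] from rfl]; simp

theorem pv_arrow_no_space : ∀ c ∈ "-->".toList, PySem.Chars.isspace c = false := by
  intro c hc
  rw [show "-->".toList = ['-','-','>'] from rfl] at hc
  fin_cases hc <;> rfl

theorem pv_isIn_strip (l : String) :
    PySem.Str.isIn "-->" (PySem.Str.strip l) = PySem.Str.isIn "-->" l := by
  rw [PySem.Str.isIn_eq, PySem.Str.isIn_eq, PySem.Str.toList_strip]
  rw [Bool.eq_iff_iff, PySem.Chars.isIn_iff_infix, PySem.Chars.isIn_iff_infix]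
  constructor
  · intro h; exact h.trans (pv_strip_infix _)
  · intro h
    rw [PySem.Chars.strip, PySem.Chars.rstrip, ← List.reverse_infix]
    simp only [List.reverse_reverse]
    apply pv_infix_dropWhile (by simp)
      (by intro c hc; exact pv_arrow_no_space c (List.mem_reverse.mp hc))
    rw [List.reverse_infix]
    exact pv_infix_dropWhile pv_arrow_ne_nil pv_arrow_no_space h

theorem pvPredA_true_of_branches (l : String)
    (h1 : ¬ PySem.Str.strIsdigit (PySem.Str.strip l) = true)
    (h2 : ¬ PySem.Str.isIn "-->" (PySem.Str.strip l) = true)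
    (h3 : ¬ (PySem.Str.len (PySem.Str.strip l) == 0) = true) :
    pvPredA l = true := by
  simp only [pvPredA, Bool.and_eq_true, bne_iff_ne, ne_eq, Bool.not_eq_true',
    ← pv_isIn_strip l]
  simp only [Bool.not_eq_true] at h1 h2
  refine ⟨⟨?_, h1⟩, h2⟩
  simpa using h3

-- A's outer while loop; each step handles the current line, the subtitle branch runs the
-- inner while (a takeWhile/dropWhile span starting at the current line).  In that branch
-- the collected block is provably nonempty (pvPredA l = true by the lemmas above), so
-- A's `if subtitle_lines` guard is always taken there.
def pvLoopA : List String → List String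
  | [] => []
  | l :: rest =>
    let s := PySem.Str.strip l
    if _h1 : PySem.Str.strIsdigit s then s :: pvLoopA rest
    else if _h2 : PySem.Str.isIn "-->" s then s :: pvLoopA rest
    else if _h3 : PySem.Str.len s == 0 then "" :: pvLoopA rest
    else
      (PySem.Str.replace (PySem.Str.replace
          (PySem.Str.join " " (((l :: rest).takeWhile pvPredA).map PySem.Str.strip)) "[" "") "]" "")
        :: pvLoopA ((l :: rest).dropWhile pvPredA)
termination_by lines => lines.length
decreasing_by
  · simp
  · simp
  · simp
  · rw [List.dropWhile_cons_of_pos (pvPredA_true_of_branches l _h1 _h2 _h3)]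
    have := List.length_dropWhile_le pvPredA rest
    simp only [List.length_cons]
    omega

-- content.split('\n') = Str.split? (never none: the separator "\n" is nonempty, so getD is exact).
def process_srt_content (content : String) : String :=
  PySem.Str.join "\n" (pvLoopA ((PySem.Str.split? content "\n").getD []))

-- ===== PORT B =====

-- Source B's flush(): join the buffered subtitle lines, drop '[' and ']' (as a list chunk).
def pvFlush (buffer : List String) : List String :=
  if buffer = [] then []
  else [PySem.Str.replace (PySem.Str.replace (PySem.Str.join " " buffer) "[" "") "]" ""]

-- Source B's single for-loop over the lines with the buffer accumulator.
def pvLoopB : List String → List String → List String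
  | buffer, [] => pvFlush buffer
  | buffer, l :: rest =>
    let s := PySem.Str.strip l
    if PySem.Str.len s != 0 && !PySem.Str.strIsdigit s && !PySem.Str.isIn "-->" s then
      pvLoopB (buffer ++ [s]) rest
    else
      pvFlush buffer ++ s :: pvLoopB [] rest

def process_srt_content_alt (content : String) : String :=
  PySem.Str.join "\n" (pvLoopB [] ((PySem.Str.split? content "\n").getD []))

-- ===== PRECONDITION & SPEC =====
def Spec_process_srt_content (content : String) (out : String) : Prop := out = process_srt_content_alt content
instance (content : String) (out : String) : Decidable (Spec_process_srt_content content out) := by unfold Spec_process_srt_content; infer_instance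

-- ===== CLAIM (what is proved, stated in full; the proofs are below) =====
def Claim_equal_process_srt_content : Prop := ∀ (content : String), Dom_process_srt_content content → Spec_process_srt_content content (process_srt_content content)

-- ===== LEMMAS AND PROOFS =====

-- A on any list of lines: first emit the (possibly empty) leading subtitle block, then
-- continue after it.  No induction needed: either the head line is a subtitle line (then
-- pvLoopA's fourth branch IS this span) or the span is empty.
theorem pvLoopA_span (lines : List String) :
    pvLoopA lines =
      pvFlush ((lines.takeWhile pvPredA).map PySem.Str.strip)
        ++ pvLoopA (lines.dropWhile pvPredA) := by
  cases lines with
  | nil => simp [pvLoopA, pvFlush]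
  | cons l rest =>
    by_cases hp : pvPredA l = true
    · have hc := hp
      simp only [pvPredA, Bool.and_eq_true, bne_iff_ne, ne_eq, Bool.not_eq_true'] at hc
      obtain ⟨⟨hlen, hdig⟩, hin⟩ := hc
      have hin' : PySem.Str.isIn "-->" (PySem.Str.strip l) = false := by
        rw [pv_isIn_strip]; exact hin
      rw [pvLoopA]
      simp only [hdig, hin', Bool.false_eq_true, dite_false]
      rw [dif_neg (by simpa using hlen)]
      rw [List.takeWhile_cons_of_pos hp, List.dropWhile_cons_of_pos hp]
      simp [pvFlush]
    · rw [List.takeWhile_cons_of_neg (by simpa using hp),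
        List.dropWhile_cons_of_neg (by simpa using hp)]
      simp [pvFlush]

-- pvPredA l = false: one of A's three special branches fires; each appends strip l.
theorem pvLoopA_cons_special (l : String) (rest : List String) (h : pvPredA l = false) :
    pvLoopA (l :: rest) = PySem.Str.strip l :: pvLoopA rest := by
  rw [pvLoopA]
  by_cases hdig : PySem.Str.strIsdigit (PySem.Str.strip l) = true
  · rw [dif_pos hdig]
  · rw [dif_neg hdig]
    by_cases hin : PySem.Str.isIn "-->" (PySem.Str.strip l) = true
    · rw [dif_pos hin]
    · rw [dif_neg hin]
      have hinl : PySem.Str.isIn "-->" l = false := by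
        rw [← pv_isIn_strip]; simpa using hin
      have hdig' : PySem.Str.strIsdigit (PySem.Str.strip l) = false := by
        simpa using hdig
      have hl : PySem.Chars.strip l.toList = [] := by
        rw [pvPredA, hdig', hinl] at h
        simpa using h
      rw [dif_pos (by simp [PySem.Str.toList_strip, hl])]
      have hs : PySem.Str.strip l = "" :=
        String.toList_eq_nil_iff.mp (by rw [PySem.Str.toList_strip]; exact hl)
      rw [hs]

-- B's loop with buffered lines `buffer`: flush buffer + the coming subtitle block, then
-- continue as A does after that block.
theorem pvLoopB_key (lines : List String) : ∀ buffer : List String,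
    pvLoopB buffer lines =
      pvFlush (buffer ++ (lines.takeWhile pvPredA).map PySem.Str.strip)
        ++ pvLoopA (lines.dropWhile pvPredA) := by
  induction lines with
  | nil => intro buffer; simp [pvLoopB, pvLoopA]
  | cons l rest ih =>
    intro buffer
    have hb : (PySem.Str.len (PySem.Str.strip l) != 0
        && !PySem.Str.strIsdigit (PySem.Str.strip l)
        && !PySem.Str.isIn "-->" (PySem.Str.strip l)) = pvPredA l := by
      simp only [pvPredA, pv_isIn_strip]
    rw [pvLoopB]
    simp only [hb]
    by_cases hp : pvPredA l = true
    · rw [if_pos hp, ih, List.takeWhile_cons_of_pos hp, List.dropWhile_cons_of_pos hp]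
      simp
    · have hp' : pvPredA l = false := by simpa using hp
      rw [if_neg hp, ih [], List.takeWhile_cons_of_neg (by simpa using hp),
        List.dropWhile_cons_of_neg (by simpa using hp), List.nil_append,
        pvLoopA_cons_special l rest hp', pvLoopA_span rest]
      simp

-- ===== VERDICT (by name: the statement is the Claim_ definition above) =====
theorem process_srt_content_spec : Claim_equal_process_srt_content := by
  intro content _
  unfold Spec_process_srt_content process_srt_content process_srt_content_alt
  rw [pvLoopB_key _ [], List.nil_append, ← pvLoopA_span]
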